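-- pv_equiv track=rewrite | github.com/Redwoods87/CS167 | randomness.py | scaledParkMillerSequence
-- ===== SOURCE A (Python) =====
-- def lehmer(r,m,a):
--   """
--   r = seed or previous random number
--   m = a prime number
--   a = any integer between 1 and m-1
--   """
--   return (a*r) % m
--
-- def scaledParkMillerSequence(length, seed, stop):
--   r = seed
--   m = 2**31 - 1
--   a = 16807
--   randList = []
--   for index in range(length):
--     r = lehmer(r,m,a)
--     randList.append(r % stop)
--   return randList
-- ===== SOURCE B (Python) =====
-- def scaledParkMillerSequence(length, seed, stop):
--   m = 2**31 - 1
--   a = 16807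
--   return [seed * pow(a, k + 1, m) % m % stop for k in range(length)]
-- ===== Notes on version B (the rewrite author's own statement) =====
-- stated objective: alternative
-- what changed: Replaces A's stateful Lehmer recurrence loop (running r updated each iteration, explicit append) with a list comprehension computing each term independently from the closed form seed * a^(k+1) mod m via modular exponentiation.
import Mathlib
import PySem

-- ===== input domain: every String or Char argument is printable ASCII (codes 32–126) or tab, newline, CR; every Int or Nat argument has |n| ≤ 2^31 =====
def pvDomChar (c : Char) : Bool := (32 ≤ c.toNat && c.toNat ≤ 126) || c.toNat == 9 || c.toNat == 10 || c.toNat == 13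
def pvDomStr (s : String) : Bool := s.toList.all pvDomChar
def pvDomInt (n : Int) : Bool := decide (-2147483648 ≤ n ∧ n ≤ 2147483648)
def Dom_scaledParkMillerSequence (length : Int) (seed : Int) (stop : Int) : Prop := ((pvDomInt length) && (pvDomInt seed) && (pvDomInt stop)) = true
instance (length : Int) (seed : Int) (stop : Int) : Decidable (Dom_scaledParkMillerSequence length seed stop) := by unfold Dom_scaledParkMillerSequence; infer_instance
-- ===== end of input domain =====

-- B computes each Park–Miller term from the closed form seed * a^(k+1) mod m instead of the
-- stateful Lehmer recurrence; the same values are produced, the objective is an alternative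
-- decomposition (stateless comprehension), not speed.

-- ===== PORT A =====
def lehmer (r : Int) (m : Int) (a : Int) : Int := PySem.Int.mod (a * r) m

def scaledParkMillerSequence (length : Int) (seed : Int) (stop : Int) : List Int :=
  let m : Int := 2 ^ 31 - 1
  let a : Int := 16807
  let st := (PySem.List.pyRange 0 length 1).foldl
    (fun (acc : Int × List Int) _ =>
      let r := lehmer acc.1 m a
      (r, acc.2 ++ [PySem.Int.mod r stop]))
    (seed, [])
  st.2

-- ===== PORT B =====
-- pow(a, k+1, m) is ported as PySem.Int.mod (a ^ (k+1).toNat) m — exact, since k ≥ 0 in range(length).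
def scaledParkMillerSequence_alt (length : Int) (seed : Int) (stop : Int) : List Int :=
  let m : Int := 2 ^ 31 - 1
  let a : Int := 16807
  (PySem.List.pyRange 0 length 1).map
    (fun k => PySem.Int.mod (PySem.Int.mod (seed * PySem.Int.mod (a ^ (k + 1).toNat) m) m) stop)

-- ===== PRECONDITION & SPEC =====
-- Pre_ excludes exactly the inputs where Python A raises ZeroDivisionError: stop = 0 with at
-- least one iteration (r % 0).
def Pre_scaledParkMillerSequence (length : Int) (seed : Int) (stop : Int) : Prop :=
  length ≤ 0 ∨ stop ≠ 0
instance (length : Int) (seed : Int) (stop : Int) : Decidable (Pre_scaledParkMillerSequence length seed stop) := by unfold Pre_scaledParkMillerSequence; infer_instance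

def pvWitness_scaledParkMillerSequence : Int × Int × Int := (5, 42, 100)

def Spec_scaledParkMillerSequence (length : Int) (seed : Int) (stop : Int) (out : List Int) : Prop := out = scaledParkMillerSequence_alt length seed stop
instance (length : Int) (seed : Int) (stop : Int) (out : List Int) : Decidable (Spec_scaledParkMillerSequence length seed stop out) := by unfold Spec_scaledParkMillerSequence; infer_instance

-- ===== CLAIM (what is proved, stated in full; the proofs are below) =====
def Claim_equal_scaledParkMillerSequence : Prop := ∀ (length : Int) (seed : Int) (stop : Int), Dom_scaledParkMillerSequence length seed stop → Pre_scaledParkMillerSequence length seed stop → Spec_scaledParkMillerSequence length seed stop (scaledParkMillerSequence length seed stop)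

-- ===== LEMMAS AND PROOFS =====

lemma pvM_pos : (0 : Int) < 2 ^ 31 - 1 := by norm_num

-- multiplying by a reduced factor does not change the residue
lemma pv_mul_mod_right (x y : Int) : x * (y % (2 ^ 31 - 1)) % (2 ^ 31 - 1) = x * y % (2 ^ 31 - 1) := by
  conv_lhs => rw [Int.mul_emod]
  rw [Int.emod_emod_of_dvd _ dvd_rfl, ← Int.mul_emod]

-- invariant of A's fold over range(n): state is (current r, list built so far)
lemma pv_foldA (seed stop : Int) (n : Nat) :
    ((PySem.List.pyRange 0 (n : Int) 1).foldl
      (fun (acc : Int × List Int) _ =>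
        let r := lehmer acc.1 (2 ^ 31 - 1) 16807
        (r, acc.2 ++ [PySem.Int.mod r stop]))
      (seed, [])) =
    ((if n = 0 then seed else PySem.Int.mod (seed * 16807 ^ n) (2 ^ 31 - 1)),
     (List.range n).map (fun k =>
       PySem.Int.mod (PySem.Int.mod (seed * PySem.Int.mod ((16807 : Int) ^ (k + 1)) (2 ^ 31 - 1)) (2 ^ 31 - 1)) stop)) := by
  induction n with
  | zero => simp
  | succ n ih =>
    have hcast : ((n + 1 : Nat) : Int) = (n : Int) + 1 := by push_cast; ring
    rw [hcast, PySem.List.pyRange_one_succ_right (by positivity), List.foldl_append, ih]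
    simp only [List.foldl_cons, List.foldl_nil, List.range_succ, List.map_append, List.map_cons,
      List.map_nil, Nat.succ_ne_zero, if_false, Prod.mk.injEq]
    have hr : lehmer (if n = 0 then seed else PySem.Int.mod (seed * 16807 ^ n) (2 ^ 31 - 1))
        (2 ^ 31 - 1) 16807 = PySem.Int.mod (seed * 16807 ^ (n + 1)) (2 ^ 31 - 1) := by
      by_cases h : n = 0
      · simp [h, lehmer]; ring_nf
      · simp only [h, if_false, lehmer, PySem.Int.mod_eq_emod_of_pos pvM_pos]
        rw [pv_mul_mod_right]
        ring_nf
    have hb : PySem.Int.mod (seed * PySem.Int.mod ((16807 : Int) ^ (n + 1)) (2 ^ 31 - 1)) (2 ^ 31 - 1)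
        = PySem.Int.mod (seed * 16807 ^ (n + 1)) (2 ^ 31 - 1) := by
      simp only [PySem.Int.mod_eq_emod_of_pos pvM_pos]
      exact pv_mul_mod_right _ _
    exact ⟨hr, by rw [hr, hb]⟩

-- ===== VERDICT (by name: the statement is the Claim_ definition above) =====
theorem scaledParkMillerSequence_spec : Claim_equal_scaledParkMillerSequence := by
  intro length seed stop _ _
  unfold Spec_scaledParkMillerSequence scaledParkMillerSequence scaledParkMillerSequence_alt
  dsimp only
  by_cases hl : length ≤ 0
  · simp [PySem.List.pyRange_one_eq_nil hl]
  · have h : length = ((length.toNat : Nat) : Int) := by omega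
    rw [h, pv_foldA, PySem.List.pyRange_zero_nat, List.map_map]
    rfl
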